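-- pv_equiv track=rewrite | github.com/th19xcf/python-quant | src/utils/exceptions.py | get_error_code_category
-- ===== SOURCE A (Python) =====
-- def get_error_code_category(error_code: str) -> str:
--     """
--     获取错误码分类
--
--     Args:
--         error_code: 错误码
--
--     Returns:
--         str: 错误分类
--     """
--     categories = {
--         "DATASOURCE_": "数据源",
--         "DATA_": "数据",
--         "CALCULATION_": "计算",
--         "UI_": "UI",
--         "CONFIG_": "配置",
--         "PLUGIN_": "插件",
--     }
--
--     for prefix, category in categories.items():
--         if error_code.startswith(prefix):
--             return category
--
--     return "其他"
-- ===== SOURCE B (Python) =====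
-- def get_error_code_category(error_code: str) -> str:
--     """
--     获取错误码分类
--
--     Args:
--         error_code: 错误码
--
--     Returns:
--         str: 错误分类
--     """
--     categories = {
--         "DATASOURCE_": "数据源",
--         "DATA_": "数据",
--         "CALCULATION_": "计算",
--         "UI_": "UI",
--         "CONFIG_": "配置",
--         "PLUGIN_": "插件",
--     }
--     idx = error_code.find("_")
--     if idx == -1:
--         return "其他"
--     return categories.get(error_code[:idx + 1], "其他")
-- ===== Notes on version B (the rewrite author's own statement) =====
-- stated objective: alternative
-- what changed: Replaces the linear startswith scan over all category prefixes by computing the candidate key directly: slice up to and including the first underscore and do a single dict lookup (valid because every key's only underscore is its last character).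
import Mathlib
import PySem

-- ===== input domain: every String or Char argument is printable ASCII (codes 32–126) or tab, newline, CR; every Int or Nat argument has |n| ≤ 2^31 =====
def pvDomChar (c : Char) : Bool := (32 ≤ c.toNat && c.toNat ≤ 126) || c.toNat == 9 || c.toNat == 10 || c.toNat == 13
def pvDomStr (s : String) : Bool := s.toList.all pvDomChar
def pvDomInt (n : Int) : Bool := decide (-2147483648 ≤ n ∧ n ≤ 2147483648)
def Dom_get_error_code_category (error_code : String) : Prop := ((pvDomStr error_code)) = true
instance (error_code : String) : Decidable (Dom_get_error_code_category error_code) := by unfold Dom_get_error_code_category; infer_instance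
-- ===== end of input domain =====

-- B replaces A's linear startswith scan over the category prefixes by slicing the input up to and
-- including its first underscore and doing a single dict lookup (objective: alternative).

-- ===== PORT A =====
def pvCatsA : PySem.Dict String String := PySem.Dict.ofList
  [("DATASOURCE_", "数据源"), ("DATA_", "数据"), ("CALCULATION_", "计算"),
   ("UI_", "UI"), ("CONFIG_", "配置"), ("PLUGIN_", "插件")]

-- the 'for prefix, category in categories.items(): if error_code.startswith(prefix): return category' loop
def pvLoopA : List (String × String) → String → String
  | [], _ => "其他"
  | (p, c) :: rest, ec => if PySem.Str.startswith ec p then c else pvLoopA rest ec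

def get_error_code_category (error_code : String) : String :=
  pvLoopA pvCatsA.items error_code

-- ===== PORT B =====
def pvCatsB : PySem.Dict String String := PySem.Dict.ofList
  [("DATASOURCE_", "数据源"), ("DATA_", "数据"), ("CALCULATION_", "计算"),
   ("UI_", "UI"), ("CONFIG_", "配置"), ("PLUGIN_", "插件")]

def get_error_code_category_alt (error_code : String) : String :=
  let idx := PySem.Str.find error_code "_"
  if idx = -1 then "其他"
  else pvCatsB.getD (PySem.Str.slice error_code none (some (idx + 1))) "其他"

-- ===== PRECONDITION & SPEC =====
def Spec_get_error_code_category (error_code : String) (out : String) : Prop := out = get_error_code_category_alt error_code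
instance (error_code : String) (out : String) : Decidable (Spec_get_error_code_category error_code out) := by unfold Spec_get_error_code_category; infer_instance

-- ===== CLAIM (what is proved, stated in full; the proofs are below) =====
def Claim_equal_get_error_code_category : Prop := ∀ (error_code : String), Dom_get_error_code_category error_code → Spec_get_error_code_category error_code (get_error_code_category error_code)

-- ===== LEMMAS AND PROOFS =====

-- If k (whose only '_' is its last character) is a prefix of the input, the first '_' of the input
-- is at position k.length - 1.
theorem pv_find_key (k t : List Char) (hk : k ≠ [])
    (h1 : k.drop (k.length - 1) = ['_']) (h2 : '_' ∉ k.dropLast) :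
    PySem.Chars.find (k ++ t) ['_'] = (k.length : Int) - 1 := by
  have hlen : 0 < k.length := List.length_pos_iff.mpr hk
  have hdrop : (k ++ t).drop (k.length - 1) = '_' :: t := by
    rw [List.drop_append_of_le_length (by omega), h1]; rfl
  have hpre : ['_'] <+: (k ++ t).drop (k.length - 1) := ⟨t, by rw [hdrop]; rfl⟩
  have hmin : ∀ i, i < k.length - 1 → ¬ ['_'] <+: (k ++ t).drop i := by
    intro i hi hcon
    rw [List.drop_append_of_le_length (by omega)] at hcon
    rcases List.cons_prefix_iff.mp hcon with ⟨l', heq, -⟩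
    have hki : i < k.length := by omega
    rw [List.drop_eq_getElem_cons hki] at heq
    have hgi : k[i] = '_' := by injection heq
    apply h2
    have hdl : i < k.dropLast.length := by simp [List.length_dropLast]; omega
    have hmem : k.dropLast[i]'hdl ∈ k.dropLast := List.getElem_mem hdl
    rwa [List.getElem_dropLast, hgi] at hmem
  have h0 : 0 ≤ PySem.Chars.find (k ++ t) ['_'] := by
    rw [PySem.Chars.find_nonneg_iff]
    exact (PySem.Chars.isIn_iff_infix _ _).mp
      ((PySem.Chars.exists_prefix_drop_iff_isIn _ _).mp ⟨k.length - 1, hpre⟩)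
  obtain ⟨hp, hm⟩ := PySem.Chars.find_spec h0
  have htn : (PySem.Chars.find (k ++ t) ['_']).toNat = k.length - 1 := by
    rcases Nat.lt_trichotomy (PySem.Chars.find (k ++ t) ['_']).toNat (k.length - 1) with h | h | h
    · exact absurd hp (hmin _ h)
    · exact h
    · exact absurd hpre (hm _ h)
  omega

-- B unfolded at a symbolic argument
theorem pv_alt_eq (s : String) : get_error_code_category_alt s =
    (if PySem.Str.find s "_" = -1 then "其他"
     else pvCatsB.getD (PySem.Str.slice s none (some (PySem.Str.find s "_" + 1))) "其他") := rfl

-- positive case: a key kk of the dict (its only '_' its last char) is a prefix of s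
theorem pv_pos (s kk cat : String)
    (hget : pvCatsB.getD kk "其他" = cat)
    (hk : kk.toList ≠ []) (h1 : kk.toList.drop (kk.toList.length - 1) = ['_'])
    (h2 : '_' ∉ kk.toList.dropLast)
    (hp : PySem.Str.startswith s kk = true) :
    get_error_code_category_alt s = cat := by
  rw [PySem.Str.startswith_eq] at hp
  obtain ⟨t, ht⟩ := (PySem.Chars.startswith_iff _ _).mp hp
  have hf : PySem.Str.find s "_" = (kk.toList.length : Int) - 1 := by
    rw [PySem.Str.find_eq]
    have h_ : ("_" : String).toList = ['_'] := rfl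
    rw [h_, ← ht]
    exact pv_find_key _ t hk h1 h2
  have hlen : 0 < kk.toList.length := List.length_pos_iff.mpr hk
  rw [pv_alt_eq, hf, if_neg (by omega)]
  have hsl : PySem.Str.slice s none (some ((kk.toList.length : Int) - 1 + 1)) = kk := by
    apply String.toList_inj.mp
    rw [PySem.Str.toList_slice, PySem.Chars.slice_eq_listSlice]
    have e : ((kk.toList.length : Int) - 1 + 1) = ((kk.toList.length : Nat) : Int) := by ring
    rw [e, PySem.List.slice_to_natCast, ← ht, List.take_left]
  rw [hsl, hget]

theorem pv_main (s : String) : get_error_code_category s = get_error_code_category_alt s := by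
  have hA : get_error_code_category s =
      (if PySem.Str.startswith s "DATASOURCE_" = true then "数据源"
       else if PySem.Str.startswith s "DATA_" = true then "数据"
       else if PySem.Str.startswith s "CALCULATION_" = true then "计算"
       else if PySem.Str.startswith s "UI_" = true then "UI"
       else if PySem.Str.startswith s "CONFIG_" = true then "配置"
       else if PySem.Str.startswith s "PLUGIN_" = true then "插件"
       else "其他") := rfl
  rw [hA]
  by_cases p1 : PySem.Str.startswith s "DATASOURCE_" = true
  · rw [if_pos p1, pv_pos s "DATASOURCE_" "数据源" rfl (by decide) (by decide) (by decide) p1]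
  rw [if_neg p1]
  by_cases p2 : PySem.Str.startswith s "DATA_" = true
  · rw [if_pos p2, pv_pos s "DATA_" "数据" rfl (by decide) (by decide) (by decide) p2]
  rw [if_neg p2]
  by_cases p3 : PySem.Str.startswith s "CALCULATION_" = true
  · rw [if_pos p3, pv_pos s "CALCULATION_" "计算" rfl (by decide) (by decide) (by decide) p3]
  rw [if_neg p3]
  by_cases p4 : PySem.Str.startswith s "UI_" = true
  · rw [if_pos p4, pv_pos s "UI_" "UI" rfl (by decide) (by decide) (by decide) p4]
  rw [if_neg p4]
  by_cases p5 : PySem.Str.startswith s "CONFIG_" = true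
  · rw [if_pos p5, pv_pos s "CONFIG_" "配置" rfl (by decide) (by decide) (by decide) p5]
  rw [if_neg p5]
  by_cases p6 : PySem.Str.startswith s "PLUGIN_" = true
  · rw [if_pos p6, pv_pos s "PLUGIN_" "插件" rfl (by decide) (by decide) (by decide) p6]
  rw [if_neg p6]
  -- no key matches: both sides are "其他"
  by_cases hf : PySem.Str.find s "_" = -1
  · rw [pv_alt_eq, if_pos hf]
  · rw [pv_alt_eq, if_neg hf]
    have hge : 0 ≤ PySem.Str.find s "_" := by
      have := PySem.Chars.neg_one_le_find s.toList ("_" : String).toList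
      rw [← PySem.Str.find_eq] at this
      rcases lt_or_eq_of_le this with h | h
      · omega
      · exact absurd h.symm hf
    -- the sliced key is a prefix of s, so it equals none of the dict keys
    have hkey : ∀ kk : String, PySem.Str.startswith s kk ≠ true →
        PySem.Str.slice s none (some (PySem.Str.find s "_" + 1)) ≠ kk := by
      intro kk hns he
      apply hns
      rw [PySem.Str.startswith_eq]
      apply (PySem.Chars.startswith_iff _ _).mpr
      have : kk.toList = s.toList.take (PySem.Str.find s "_" + 1).toNat := by
        rw [← he, PySem.Str.toList_slice, PySem.Chars.slice_eq_listSlice,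
          PySem.List.slice_to _ (by omega)]
      rw [this]
      exact List.take_prefix _ _
    have e : pvCatsB = PySem.Dict.mk
        [("DATASOURCE_", "数据源"), ("DATA_", "数据"), ("CALCULATION_", "计算"),
         ("UI_", "UI"), ("CONFIG_", "配置"), ("PLUGIN_", "插件")] := rfl
    rw [e]
    simp only [PySem.Dict.getD, PySem.Dict.get?_mk_cons]
    rw [beq_eq_false_iff_ne.mpr (Ne.symm (hkey _ p1)),
        beq_eq_false_iff_ne.mpr (Ne.symm (hkey _ p2)),
        beq_eq_false_iff_ne.mpr (Ne.symm (hkey _ p3)),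
        beq_eq_false_iff_ne.mpr (Ne.symm (hkey _ p4)),
        beq_eq_false_iff_ne.mpr (Ne.symm (hkey _ p5)),
        beq_eq_false_iff_ne.mpr (Ne.symm (hkey _ p6))]
    simp [PySem.Dict.get?]

-- ===== VERDICT (by name: the statement is the Claim_ definition above) =====
theorem get_error_code_category_spec : Claim_equal_get_error_code_category := by
  intro s _
  unfold Spec_get_error_code_category
  exact pv_main s
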